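-- pv_equiv track=rewrite | github.com/doggydaddy90/robozilla-core | runtime/core/economics/resource_market.py | _platform_for_tool_id
-- ===== SOURCE A (Python) =====
-- def _platform_for_tool_id(tool_id: str, mapping: dict[str, str]) -> str:
--     token = tool_id.strip().lower()
--     if not token:
--         return ""
--     for needle in sorted(mapping.keys(), key=len, reverse=True):
--         platform = mapping[needle]
--         if needle in token:
--             return platform
--     return "other"
-- ===== SOURCE B (Python) =====
-- def _platform_for_tool_id(tool_id: str, mapping: dict[str, str]) -> str:
--     token = tool_id.strip().lower()
--     if not token:
--         return ""
--     best = None  # (needle, platform): longest matching needle seen, first wins on ties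
--     for needle, platform in mapping.items():
--         if needle in token and (best is None or len(best[0]) < len(needle)):
--             best = (needle, platform)
--     return "other" if best is None else best[1]
-- ===== Notes on version B (the rewrite author's own statement) =====
-- stated objective: simpler
-- what changed: Replaces A's length-descending sort of the keys followed by a first-match scan with a single pass over mapping.items() that keeps the first strictly-longest matching key, eliminating the sort and the per-key dict lookup.
import Mathlib
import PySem

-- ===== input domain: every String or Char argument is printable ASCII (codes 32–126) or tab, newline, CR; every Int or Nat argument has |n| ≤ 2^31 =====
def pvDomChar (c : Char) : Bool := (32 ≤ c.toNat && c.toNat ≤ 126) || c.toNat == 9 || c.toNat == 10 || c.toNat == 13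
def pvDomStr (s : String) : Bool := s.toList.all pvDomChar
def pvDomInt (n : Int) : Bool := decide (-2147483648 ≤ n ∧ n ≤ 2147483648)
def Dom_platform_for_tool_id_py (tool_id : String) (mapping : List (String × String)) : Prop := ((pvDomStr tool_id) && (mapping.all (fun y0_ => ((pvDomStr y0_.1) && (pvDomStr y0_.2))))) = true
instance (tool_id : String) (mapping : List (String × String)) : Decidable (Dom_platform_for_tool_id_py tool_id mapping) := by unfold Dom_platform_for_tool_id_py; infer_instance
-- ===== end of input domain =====

-- B replaces A's length-descending key sort + first-match scan by one pass over the
-- dict items keeping the first strictly-longest matching key (objective: simpler).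

-- ===== PORT A =====
-- A's for-loop over the sorted keys; mapping[needle] cannot raise (needle ∈ keys), so getD "" is exact
def pvLoopA (d : PySem.Dict String String) (token : String) : List String → String
  | [] => "other"
  | needle :: rest =>
    let platform := (d.get? needle).getD ""
    if PySem.Str.isIn needle token then platform else pvLoopA d token rest

def platform_for_tool_id_py (tool_id : String) (mapping : List (String × String)) : String :=
  let token := PySem.Str.lower (PySem.Str.strip tool_id)
  if token = "" then ""
  else
    let d := PySem.Dict.ofList mapping
    pvLoopA d token (PySem.List.sorted d.keys PySem.Str.len true)

-- ===== PORT B =====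
def pvStepB (token : String) (best : Option (String × String)) (kv : String × String) :
    Option (String × String) :=
  if PySem.Str.isIn kv.1 token &&
      (match best with
       | none => true
       | some b => decide (PySem.Str.len b.1 < PySem.Str.len kv.1)) then
    some kv
  else best

def platform_for_tool_id_py_alt (tool_id : String) (mapping : List (String × String)) : String :=
  let token := PySem.Str.lower (PySem.Str.strip tool_id)
  if token = "" then ""
  else
    match (PySem.Dict.ofList mapping).items.foldl (pvStepB token) none with
    | none => "other"
    | some best => best.2

-- ===== PRECONDITION & SPEC =====
def Spec_platform_for_tool_id_py (tool_id : String) (mapping : List (String × String)) (out : String) : Prop := out = platform_for_tool_id_py_alt tool_id mapping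
instance (tool_id : String) (mapping : List (String × String)) (out : String) : Decidable (Spec_platform_for_tool_id_py tool_id mapping out) := by unfold Spec_platform_for_tool_id_py; infer_instance

-- ===== CLAIM (what is proved, stated in full; the proofs are below) =====
def Claim_equal_platform_for_tool_id_py : Prop := ∀ (tool_id : String) (mapping : List (String × String)), Dom_platform_for_tool_id_py tool_id mapping → Spec_platform_for_tool_id_py tool_id mapping (platform_for_tool_id_py tool_id mapping)

-- ===== LEMMAS AND PROOFS =====

-- the needle returned by A's scan: first element of the list that is a substring of token
def pvFirst? (token : String) : List String → Option String
  | [] => none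
  | n :: r => if PySem.Str.isIn n token then some n else pvFirst? token r

-- the key B's fold keeps, projected to needles only (lengths as Nat, simp normal form)
def pvStepK (token : String) (b : Option String) (x : String) : Option String :=
  if PySem.Str.isIn x token &&
      (match b with
       | none => true
       | some m => decide (m.length < x.length)) then
    some x
  else b

theorem pvFirst?_cons_pos (token n : String) (r : List String)
    (hn : PySem.Chars.isIn n.toList token.toList = true) :
    pvFirst? token (n :: r) = some n := by simp [pvFirst?, hn]

theorem pvFirst?_cons_neg (token n : String) (r : List String)
    (hn : PySem.Chars.isIn n.toList token.toList = false) :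
    pvFirst? token (n :: r) = pvFirst? token r := by simp [pvFirst?, hn]

theorem pvStepK_neg (token x : String) (b : Option String)
    (hx : PySem.Chars.isIn x.toList token.toList = false) :
    pvStepK token b x = b := by simp [pvStepK, hx]

theorem pvStepK_pos_none (token x : String)
    (hx : PySem.Chars.isIn x.toList token.toList = true) :
    pvStepK token none x = some x := by simp [pvStepK, hx]

theorem pvStepK_pos_lt (token x m : String)
    (hx : PySem.Chars.isIn x.toList token.toList = true)
    (hlt : m.length < x.length) :
    pvStepK token (some m) x = some x := by simp [pvStepK, hx, hlt]

theorem pvStepK_some_ge (token x m : String) (hge : ¬ m.length < x.length) :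
    pvStepK token (some m) x = some m := by simp [pvStepK, hge]

theorem pvLoopA_eq (d : PySem.Dict String String) (token : String) (l : List String) :
    pvLoopA d token l =
      match pvFirst? token l with
      | none => "other"
      | some n => (d.get? n).getD "" := by
  induction l with
  | nil => rfl
  | cons n r ih =>
    cases hc : PySem.Chars.isIn n.toList token.toList with
    | true => simp [pvLoopA, pvFirst?, hc]
    | false => simp [pvLoopA, pvFirst?, hc, ih]

theorem pvFirst?_mem (token : String) (l : List String) (m : String)
    (h : pvFirst? token l = some m) : m ∈ l := by
  induction l with
  | nil => simp [pvFirst?] at h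
  | cons n r ih =>
    cases hc : PySem.Chars.isIn n.toList token.toList with
    | true =>
      rw [pvFirst?_cons_pos token n r hc] at h
      simp at h; simp [h]
    | false =>
      rw [pvFirst?_cons_neg token n r hc] at h
      exact List.mem_cons_of_mem _ (ih h)

theorem pvFirst?_insertBy (token x : String) (acc : List String)
    (h : acc.Pairwise (fun a b => b.length ≤ a.length)) :
    pvFirst? token
        (PySem.List.insertBy (fun a b => decide (PySem.Str.len b < PySem.Str.len a)) x acc) =
      pvStepK token (pvFirst? token acc) x := by
  induction acc with
  | nil => simp [PySem.List.insertBy, pvFirst?, pvStepK]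
  | cons a r ih =>
    rw [List.pairwise_cons] at h
    by_cases hb : a.length < x.length
    · have hIns : PySem.List.insertBy (fun a b => decide (PySem.Str.len b < PySem.Str.len a)) x (a :: r)
          = x :: a :: r := by simp [PySem.List.insertBy, hb]
      rw [hIns]
      cases hx : PySem.Chars.isIn x.toList token.toList with
      | false =>
        rw [pvFirst?_cons_neg token x (a :: r) hx, pvStepK_neg token x _ hx]
      | true =>
        rw [pvFirst?_cons_pos token x (a :: r) hx]
        cases hm : pvFirst? token (a :: r) with
        | none => rw [pvStepK_pos_none token x hx]
        | some m =>
          have hmem := pvFirst?_mem token (a :: r) m hm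
          have hlen : m.length < x.length := by
            rcases List.mem_cons.1 hmem with hma | hmr
            · rw [hma]; exact hb
            · exact lt_of_le_of_lt (h.1 m hmr) hb
          rw [pvStepK_pos_lt token x m hx hlen]
    · have hIns : PySem.List.insertBy (fun a b => decide (PySem.Str.len b < PySem.Str.len a)) x (a :: r)
          = a :: PySem.List.insertBy (fun a b => decide (PySem.Str.len b < PySem.Str.len a)) x r := by
        simp [PySem.List.insertBy, hb]
      rw [hIns]
      cases ha : PySem.Chars.isIn a.toList token.toList with
      | true =>
        rw [pvFirst?_cons_pos token a _ ha, pvFirst?_cons_pos token a r ha,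
            pvStepK_some_ge token x a hb]
      | false =>
        rw [pvFirst?_cons_neg token a _ ha, pvFirst?_cons_neg token a r ha]
        exact ih h.2

theorem pvPairwise_insertBy (x : String) (acc : List String)
    (h : acc.Pairwise (fun a b : String => b.length ≤ a.length)) :
    (PySem.List.insertBy (fun a b => decide (PySem.Str.len b < PySem.Str.len a)) x acc).Pairwise
      (fun a b : String => b.length ≤ a.length) := by
  induction acc with
  | nil => simp [PySem.List.insertBy]
  | cons a r ih =>
    rw [List.pairwise_cons] at h
    by_cases hb : a.length < x.length
    · have hIns : PySem.List.insertBy (fun a b => decide (PySem.Str.len b < PySem.Str.len a)) x (a :: r)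
          = x :: a :: r := by simp [PySem.List.insertBy, hb]
      rw [hIns]
      refine List.pairwise_cons.2 ⟨?_, List.pairwise_cons.2 ⟨h.1, h.2⟩⟩
      intro y hy
      rcases List.mem_cons.1 hy with hy | hy
      · rw [hy]; exact le_of_lt hb
      · exact le_trans (h.1 y hy) (le_of_lt hb)
    · have hIns : PySem.List.insertBy (fun a b => decide (PySem.Str.len b < PySem.Str.len a)) x (a :: r)
          = a :: PySem.List.insertBy (fun a b => decide (PySem.Str.len b < PySem.Str.len a)) x r := by
        simp [PySem.List.insertBy, hb]
      rw [hIns]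
      refine List.pairwise_cons.2 ⟨?_, ih h.2⟩
      intro y hy
      rcases (PySem.List.mem_insertBy _ x y r).1 hy with hy | hy
      · rw [hy]; exact le_of_not_gt hb
      · exact h.1 y hy

theorem pvFirst?_foldl (token : String) (l : List String) :
    ∀ acc : List String, acc.Pairwise (fun a b : String => b.length ≤ a.length) →
      pvFirst? token
          (l.foldl (fun acc x =>
            PySem.List.insertBy (fun a b => decide (PySem.Str.len b < PySem.Str.len a)) x acc) acc) =
        l.foldl (pvStepK token) (pvFirst? token acc) := by
  induction l with
  | nil => intro acc _; rfl
  | cons x t ih =>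
    intro acc hacc
    simp only [List.foldl_cons]
    rw [ih _ (pvPairwise_insertBy x acc hacc), pvFirst?_insertBy token x acc hacc]

theorem pvFirst?_sorted (token : String) (xs : List String) :
    pvFirst? token (PySem.List.sorted xs PySem.Str.len true) = xs.foldl (pvStepK token) none := by
  rw [PySem.List.sorted_rev_eq_foldl_insertBy]
  simpa using pvFirst?_foldl token xs [] (by simp)

theorem pvStepB_fst (token : String) (l : List (String × String)) :
    ∀ b : Option (String × String),
      (l.foldl (pvStepB token) b).map (·.1) = (l.map (·.1)).foldl (pvStepK token) (b.map (·.1)) := by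
  induction l with
  | nil => intro b; rfl
  | cons kv t ih =>
    intro b
    simp only [List.foldl_cons, List.map_cons]
    rw [ih]
    congr 1
    cases b with
    | none =>
      cases hc : PySem.Chars.isIn kv.1.toList token.toList with
      | true => simp [pvStepB, pvStepK, hc]
      | false => simp [pvStepB, pvStepK, hc]
    | some p =>
      cases hc : PySem.Chars.isIn kv.1.toList token.toList with
      | true =>
        by_cases hl : p.1.length < kv.1.length
        · simp [pvStepB, pvStepK, hc, hl]
        · simp [pvStepB, pvStepK, hc, hl]
      | false => simp [pvStepB, pvStepK, hc]

theorem pvStepB_fst_none (token : String) (l : List (String × String)) :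
    (l.foldl (pvStepB token) none).map (·.1) = (l.map (·.1)).foldl (pvStepK token) none := by
  simpa using pvStepB_fst token l none

theorem pvStepB_mem (token : String) (l : List (String × String)) :
    ∀ (b : Option (String × String)) (kv : String × String),
      l.foldl (pvStepB token) b = some kv → b = some kv ∨ kv ∈ l := by
  induction l with
  | nil => intro b kv h; exact Or.inl h
  | cons a t ih =>
    intro b kv h
    simp only [List.foldl_cons] at h
    rcases ih _ kv h with h1 | h1
    · unfold pvStepB at h1
      split_ifs at h1
      · right; simp at h1; simp [h1]
      · exact Or.inl h1
    · right; exact List.mem_cons_of_mem _ h1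

-- ===== VERDICT (by name: the statement is the Claim_ definition above) =====
theorem platform_for_tool_id_py_spec : Claim_equal_platform_for_tool_id_py := by
  intro tool_id mapping _
  unfold Spec_platform_for_tool_id_py
  simp only [platform_for_tool_id_py, platform_for_tool_id_py_alt]
  set token := PySem.Str.lower (PySem.Str.strip tool_id) with htok
  by_cases h0 : token = ""
  · simp [h0]
  · rw [if_neg h0, if_neg h0]
    set d := PySem.Dict.ofList mapping with hd
    have hkeys : d.keys = d.items.map (·.1) := rfl
    rw [pvLoopA_eq, pvFirst?_sorted, hkeys, ← pvStepB_fst_none]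
    cases hf : d.items.foldl (pvStepB token) none with
    | none => simp
    | some kv =>
      rcases pvStepB_mem token d.items none kv hf with h1 | h1
      · exact absurd h1 (by simp)
      · have hnd : d.keys.Nodup := by rw [hd]; exact PySem.Dict.nodup_keys_ofList mapping
        have hget := PySem.Dict.get?_of_mem_items d (k := kv.1) (v := kv.2)
          (by simpa using h1) hnd
        simp [hget]
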